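-- pv_equiv track=rewrite | github.com/AdamZhouSE/pythonHomework | Code/CodeRecords/2610/60760/294464.py | func
-- ===== SOURCE A (Python) =====
-- def func(s:str):   #遍历一遍所有的子串
--     res=0
--     length=len(s)
--     for i in range(1,length+1):
--         for j in range(length-i+1):
--             temp=s[j:j+i]
--             l=len(temp)
--             if len(set(temp))==l:
--                 res+=l
--     return res
-- ===== SOURCE B (Python) =====
-- def func(s: str):
--     # For each end position e, count k = length of the longest duplicate-free
--     # substring ending at e (backward scan); the distinct substrings ending at e
--     # are exactly those of lengths 1..k, contributing k*(k+1)//2.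
--     res = 0
--     for e in range(len(s)):
--         seen = set()
--         k = 0
--         i = e
--         while i >= 0 and s[i] not in seen:
--             seen.add(s[i])
--             k += 1
--             i -= 1
--         res += k * (k + 1) // 2
--     return res
-- ===== Notes on version B (the rewrite author's own statement) =====
-- stated objective: faster
-- what changed: Replaced the enumerate-all-substrings O(n^3) triple pass (slice + set-size test per substring) by a per-end-position backward scan that finds the longest duplicate-free window ending there and adds its triangular length sum k*(k+1)//2 in closed form.
import Mathlib
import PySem

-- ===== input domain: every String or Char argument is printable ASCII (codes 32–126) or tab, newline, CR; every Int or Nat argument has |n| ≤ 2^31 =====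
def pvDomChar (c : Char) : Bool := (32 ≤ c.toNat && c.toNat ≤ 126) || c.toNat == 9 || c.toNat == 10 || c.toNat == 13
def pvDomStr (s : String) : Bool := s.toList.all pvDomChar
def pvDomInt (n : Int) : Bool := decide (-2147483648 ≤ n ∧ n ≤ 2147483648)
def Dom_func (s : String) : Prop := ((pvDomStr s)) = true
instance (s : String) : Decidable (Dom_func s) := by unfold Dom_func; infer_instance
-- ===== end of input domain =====

-- B replaces A's enumerate-all-substrings triple pass by a per-end-position backward
-- scan for the longest duplicate-free window plus a closed-form triangular sum (objective: faster).

-- ===== PORT A =====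
def func (s : String) : Int :=
  let res : Int := 0
  let length : Int := PySem.Str.len s
  (PySem.List.pyRange 1 (length + 1) 1).foldl (fun res i =>
    (PySem.List.pyRange 0 (length - i + 1) 1).foldl (fun res j =>
      let temp := PySem.Str.slice s (some j) (some (j + i))
      let l : Int := PySem.Str.len temp
      if PySem.Set.len (PySem.Set.ofList temp.toList) = l then res + l else res) res) res

-- ===== PORT B =====
-- the inner `while i >= 0 and s[i] not in seen` loop of Source B (guard `none => k` only
-- makes the recursion total; it is unreachable since i stays below len(s))
def bscan (cs : List Char) (seen : PySem.Set Char) (i : Int) (k : Int) : Int :=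
  if _h : 0 ≤ i then
    match PySem.List.pyGet? cs i with
    | none => k
    | some c =>
      if PySem.Set.contains seen c then k
      else bscan cs (PySem.Set.add seen c) (i - 1) (k + 1)
  else k
termination_by (i + 1).toNat
decreasing_by omega

def func_alt (s : String) : Int :=
  (PySem.List.pyRange 0 (PySem.Str.len s) 1).foldl (fun res e =>
    let k := bscan s.toList PySem.Set.empty e 0
    res + PySem.Int.floordiv (k * (k + 1)) 2) 0

-- ===== PRECONDITION & SPEC =====
def Spec_func (s : String) (out : Int) : Prop := out = func_alt s
instance (s : String) (out : Int) : Decidable (Spec_func s out) := by unfold Spec_func; infer_instance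

-- ===== CLAIM (what is proved, stated in full; the proofs are below) =====
def Claim_equal_func : Prop := ∀ (s : String), Dom_func s → Spec_func s (func s)

-- ===== LEMMAS AND PROOFS =====

-- greedy length of the longest duplicate-free prefix avoiding `seen`
def gscan (seen : List Char) : List Char → Nat
  | [] => 0
  | a :: t => if a ∈ seen then 0 else gscan (a :: seen) t + 1

lemma gscan_le_length (l : List Char) : ∀ seen, gscan seen l ≤ l.length := by
  induction l with
  | nil => intro seen; simp [gscan]
  | cons a t ih =>
    intro seen
    simp only [gscan]
    split
    · simp
    · simpa using Nat.succ_le_succ (ih (a :: seen))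


lemma gscan_congr (l : List Char) : ∀ s₁ s₂ : List Char, (∀ x, x ∈ s₁ ↔ x ∈ s₂) →
    gscan s₁ l = gscan s₂ l := by
  induction l with
  | nil => intros; rfl
  | cons a t ih =>
    intro s₁ s₂ h
    simp only [gscan, (h a)]
    split
    · rfl
    · rw [ih (a :: s₁) (a :: s₂) (by intro x; simp [h x])]

-- the duplicate-free prefixes of l avoiding seen are exactly those of length ≤ gscan seen l
lemma gscan_take_iff (l : List Char) : ∀ (seen : List Char) (i : Nat), i ≤ l.length →
    (i ≤ gscan seen l ↔ (l.take i).Nodup ∧ ∀ x ∈ l.take i, x ∉ seen) := by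
  induction l with
  | nil => intro seen i hi; simp_all [gscan]
  | cons a t ih =>
    intro seen i hi
    cases i with
    | zero => simp
    | succ j =>
      simp only [gscan, List.take_succ_cons, List.nodup_cons, List.mem_cons]
      by_cases ha : a ∈ seen
      · simp only [ha, if_pos]
        constructor
        · omega
        · rintro ⟨-, h⟩
          exact absurd ha (h a (Or.inl rfl))
      · simp only [ha, if_neg, not_false_iff]
        rw [Nat.succ_le_succ_iff]
        rw [ih (a :: seen) j (by simpa using hi)]
        constructor
        · rintro ⟨hnd, hdisj⟩
          refine ⟨⟨?_, hnd⟩, ?_⟩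
          · intro hmem; exact (hdisj a hmem) (List.mem_cons_self ..)
          · rintro x (rfl | hx)
            · exact ha
            · intro hs; exact (hdisj x hx) (List.mem_cons_of_mem _ hs)
        · rintro ⟨⟨hat, hnd⟩, hdisj⟩
          refine ⟨hnd, ?_⟩
          intro x hx
          simp only [List.mem_cons]
          rintro (rfl | hs)
          · exact hat hx
          · exact (hdisj x (Or.inr hx)) hs

-- bscan computes gscan of the reversed prefix ending at index m
lemma bscan_eq (cs : List Char) : ∀ (m : Nat), m < cs.length → ∀ (seen : PySem.Set Char) (k : Int),
    bscan cs seen (m : Int) k = k + (gscan seen ((cs.take (m + 1)).reverse) : Int) := by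
  intro m
  induction m with
  | zero =>
    intro hm seen k
    match cs, hm with
    | c :: t, _ =>
      rw [bscan]
      have hg : PySem.List.pyGet? (c :: t) ((0 : Nat) : Int) = some c := by
        rw [PySem.List.pyGet?_natCast]; rfl
      simp only [Nat.cast_zero] at hg ⊢
      rw [dif_pos (by omega), hg]
      simp only [List.take_succ_cons, List.take_zero, List.reverse_cons,
        List.reverse_nil, List.nil_append, gscan]
      by_cases hc : c ∈ seen
      · rw [if_pos (by simp [PySem.Set.contains, hc]), if_pos hc]
        simp
      · rw [if_neg (by simp [PySem.Set.contains, hc]), if_neg hc]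
        rw [bscan]
        rw [dif_neg (by omega)]
        simp
  | succ m ih =>
    intro hm seen k
    have hmlt : m < cs.length := by omega
    have hel : ∃ c, cs[m + 1]? = some c := ⟨cs[m + 1], List.getElem?_eq_getElem hm⟩
    obtain ⟨c, hc⟩ := hel
    have hg : PySem.List.pyGet? cs ((m + 1 : Nat) : Int) = some c := by
      rw [PySem.List.pyGet?_natCast, hc]
    rw [bscan, dif_pos (by positivity), hg]
    have htake : cs.take (m + 1 + 1) = cs.take (m + 1) ++ [c] := by
      rw [List.take_add_one, hc]; rfl
    rw [htake, List.reverse_append]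
    simp only [List.reverse_cons, List.reverse_nil, List.nil_append,
      List.singleton_append, gscan]
    by_cases hmem : c ∈ seen
    · rw [if_pos (by simp [PySem.Set.contains, hmem]), if_pos hmem]
      simp
    · rw [if_neg (by simp [PySem.Set.contains, hmem]), if_neg hmem]
      have harg : ((m + 1 : Nat) : Int) - 1 = ((m : Nat) : Int) := by push_cast; ring
      rw [harg, ih hmlt (PySem.Set.add seen c) (k + 1)]
      have hadd : PySem.Set.add seen c = seen ++ [c] := by
        simp [PySem.Set.add, PySem.Set.contains, hmem]
      rw [hadd, gscan_congr ((cs.take (m + 1)).reverse) (seen ++ [c]) (c :: seen)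
        (by intro x; simp [or_comm])]
      push_cast
      ring

-- number of distinct elements equals length iff no duplicates
lemma foldl_add_len_le (xs : List Char) : ∀ s : PySem.Set Char,
    (xs.foldl PySem.Set.add s).length ≤ s.length + xs.length := by
  induction xs with
  | nil => simp
  | cons x t ih =>
    intro s
    simp only [List.foldl_cons]
    calc (t.foldl PySem.Set.add (PySem.Set.add s x)).length
        ≤ (PySem.Set.add s x).length + t.length := ih _
      _ ≤ s.length + (x :: t).length := by
          simp only [PySem.Set.add]
          split
          · simp
          · simp; omega

lemma foldl_add_len_iff (xs : List Char) : ∀ s : PySem.Set Char,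
    ((xs.foldl PySem.Set.add s).length = s.length + xs.length ↔
      xs.Nodup ∧ ∀ x ∈ xs, x ∉ s) := by
  induction xs with
  | nil => simp
  | cons x t ih =>
    intro s
    simp only [List.foldl_cons, List.nodup_cons, List.mem_cons]
    by_cases hx : x ∈ s
    · have hc : PySem.Set.add s x = s := by
        simp [PySem.Set.add, hx]
      rw [hc]
      have := foldl_add_len_le t s
      constructor
      · intro h; simp at h; omega
      · rintro ⟨-, h⟩; exact absurd hx (h x (Or.inl rfl))
    · have hc : PySem.Set.add s x = s ++ [x] := by
        simp [PySem.Set.add, hx]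
      rw [hc]
      have hlen : List.length s + (x :: t).length = (s ++ [x]).length + t.length := by
        simp; omega
      rw [hlen, ih]
      constructor
      · rintro ⟨hnd, hdisj⟩
        refine ⟨⟨fun hxt => (hdisj x hxt) (by simp), hnd⟩, ?_⟩
        rintro y (rfl | hy)
        · exact hx
        · intro hys; exact (hdisj y hy) (by simp [hys])
      · rintro ⟨⟨hxt, hnd⟩, hdisj⟩
        refine ⟨hnd, ?_⟩
        intro y hy hmem
        simp only [List.mem_append, List.mem_singleton] at hmem
        rcases hmem with h | rfl
        · exact (hdisj y (Or.inr hy)) h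
        · exact hxt hy
  
lemma ofList_len_iff (xs : List Char) :
    PySem.Set.len (PySem.Set.ofList xs) = (xs.length : Int) ↔ xs.Nodup := by
  have h := foldl_add_len_iff xs PySem.Set.empty
  simp only [PySem.Set.empty, List.length_nil, Nat.zero_add, List.not_mem_nil,
    not_false_iff, imp_true_iff, and_true] at h
  rw [PySem.Set.len, PySem.Set.ofList]
  exact_mod_cast h

-- a foldl with a conditional accumulator is a starting value plus a sum
lemma foldl_ite_sum {α : Type} (l : List α) (c : α → Prop) [DecidablePred c] (g : α → Int) (a : Int) :
    l.foldl (fun res x => if c x then res + g x else res) a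
      = a + (l.map (fun x => if c x then g x else 0)).sum := by
  have hf : (fun (res : Int) x => if c x then res + g x else res)
      = (fun res x => res + if c x then g x else 0) := by
    funext res x; split <;> simp
  rw [hf, PySem.List.foldl_add]

lemma sum_map_range {M : Type} [AddCommMonoid M] (n : Nat) (f : Nat → M) :
    ((List.range n).map f).sum = ∑ i ∈ Finset.range n, f i := by
  induction n with
  | zero => simp
  | succ m ih => simp [List.range_succ, Finset.sum_range_succ, ih]

-- the substring summand of A
def Fsub (cs : List Char) (i j : Nat) : Int :=
  if ((cs.drop j).take i).Nodup then (i : Int) else 0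

lemma funcA_eq (s : String) :
    func s = ∑ a ∈ Finset.range s.toList.length,
      ∑ b ∈ Finset.range (s.toList.length - a), Fsub s.toList (a + 1) b := by
  set cs := s.toList with hcs
  set n := cs.length with hn
  simp only [func, PySem.Str.len_eq, ← hcs, ← hn]
  simp only [foldl_ite_sum]
  rw [PySem.List.foldl_add]
  simp only [PySem.List.pyRange_one, List.map_map, add_sub_cancel_right,
    Int.toNat_natCast, sum_map_range, zero_add]
  refine Finset.sum_congr rfl ?_
  intro a ha
  simp only [Finset.mem_range] at ha
  simp only [Function.comp]
  rw [show ((n : Int) - (1 + (a : Int)) + 1 - 0).toNat = n - a from by omega]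
  refine Finset.sum_congr rfl ?_
  intro b hb
  simp only [Finset.mem_range] at hb
  have hslice : (PySem.Str.slice s (some ((b : Int)))
      (some ((b : Int) + (1 + (a : Int))))).toList = (cs.drop b).take (a + 1) := by
    rw [PySem.Str.toList_slice, PySem.Chars.slice_eq_listSlice]
    have h2 : ((b : Int) + (1 + (a : Int))) = (((b + (a + 1)) : Nat) : Int) := by
      push_cast; ring
    rw [h2, ← hcs, PySem.List.slice_natCast]
    congr 1
    omega
  have hlen2 : ((cs.drop b).take (a + 1)).length = a + 1 := by
    simp only [List.length_take, List.length_drop]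
    omega
  simp only [Fsub]
  rw [hslice]
  by_cases hnd : ((cs.drop b).take (a + 1)).Nodup
  · rw [if_pos ((ofList_len_iff _).mpr hnd), if_pos hnd, hlen2]
  · rw [if_neg (fun h => hnd ((ofList_len_iff _).mp h)), if_neg hnd]

lemma sum_exchange (n : Nat) (F : Nat → Nat → Int) :
    (∑ i ∈ Finset.range n, ∑ j ∈ Finset.range (n - i), F i j)
      = ∑ e ∈ Finset.range n, ∑ i ∈ Finset.range (e + 1), F i (e - i) := by
  rw [Finset.sum_sigma', Finset.sum_sigma']
  refine Finset.sum_nbij' (fun p => ⟨p.1 + p.2, p.1⟩) (fun q => ⟨q.2, q.1 - q.2⟩)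
    ?_ ?_ ?_ ?_ ?_
  · rintro ⟨i, j⟩ hp
    simp only [Finset.mem_sigma, Finset.mem_range] at *
    omega
  · rintro ⟨e, i⟩ hq
    simp only [Finset.mem_sigma, Finset.mem_range] at *
    omega
  · rintro ⟨i, j⟩ hp
    simp only [Finset.mem_sigma, Finset.mem_range] at hp
    have h1 : i + j - i = j := by omega
    simp [h1]
  · rintro ⟨e, i⟩ hq
    simp only [Finset.mem_sigma, Finset.mem_range] at hq
    have h1 : i + (e - i) = e := by omega
    simp [h1]
  · rintro ⟨i, j⟩ hp
    simp only [Finset.mem_sigma, Finset.mem_range] at hp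
    have : i + j - i = j := by omega
    simp [this]

lemma gauss (k : Nat) : (2 : Int) * ∑ i ∈ Finset.range k, ((i : Int) + 1) = k * (k + 1) := by
  induction k with
  | zero => simp
  | succ m ih =>
    rw [Finset.sum_range_succ]
    push_cast
    push_cast at ih
    ring_nf
    ring_nf at ih
    omega

lemma floordiv_double (m : Int) : PySem.Int.floordiv (2 * m) 2 = m := by
  rw [PySem.Int.floordiv]
  exact Int.mul_fdiv_cancel_left m (by norm_num)

-- the substrings ending at position e with all-distinct characters are exactly
-- those of length 1..k where k is the greedy backward-scan length
lemma per_e (cs : List Char) (e : Nat) (he : e < cs.length) :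
    (∑ i ∈ Finset.range (e + 1), Fsub cs (i + 1) (e - i))
      = PySem.Int.floordiv
          ((gscan [] ((cs.take (e + 1)).reverse) : Int)
            * ((gscan [] ((cs.take (e + 1)).reverse) : Int) + 1)) 2 := by
  set k := gscan [] ((cs.take (e + 1)).reverse) with hk
  have hrevlen : ((cs.take (e + 1)).reverse).length = e + 1 := by
    simp [List.length_take]; omega
  have hkle : k ≤ e + 1 := by
    have := gscan_le_length ((cs.take (e + 1)).reverse) []
    omega
  have hterm : ∀ i ∈ Finset.range (e + 1),
      Fsub cs (i + 1) (e - i) = if i + 1 ≤ k then ((i : Int) + 1) else 0 := by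
    intro i hi
    simp only [Finset.mem_range] at hi
    have hsub : ((cs.take (e + 1)).reverse).take (i + 1)
        = ((cs.drop (e - i)).take (i + 1)).reverse := by
      rw [List.take_reverse]
      have hlen1 : (List.take (e + 1) cs).length = e + 1 := by
        rw [List.length_take]; omega
      rw [hlen1, show e + 1 - (i + 1) = e - i from by omega, List.drop_take,
        show e + 1 - (e - i) = i + 1 from by omega]
    have hiff : ((cs.drop (e - i)).take (i + 1)).Nodup ↔ i + 1 ≤ k := by
      rw [← List.nodup_reverse, ← hsub]
      rw [hk]
      rw [Iff.comm]
      rw [gscan_take_iff _ [] (i + 1) (by omega)]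
      simp
    rw [Fsub]
    split_ifs with h1 h2 h2
    · push_cast; ring
    · exact absurd (hiff.mp h1) h2
    · exact absurd (hiff.mpr h2) h1
    · rfl
  rw [Finset.sum_congr rfl hterm]
  have hsum : (∑ i ∈ Finset.range (e + 1), if i + 1 ≤ k then ((i : Int) + 1) else 0)
      = ∑ i ∈ Finset.range k, ((i : Int) + 1) := by
    rw [← Finset.sum_filter]
    have hfil : Finset.filter (fun i => i + 1 ≤ k) (Finset.range (e + 1))
        = Finset.range k := by
      ext x
      simp only [Finset.mem_filter, Finset.mem_range]
      omega
    rw [hfil]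
  rw [hsum]
  have h2 : (k : Int) * ((k : Int) + 1) = 2 * ∑ i ∈ Finset.range k, ((i : Int) + 1) := by
    rw [gauss]
  rw [h2, floordiv_double]

lemma funcB_eq (s : String) :
    func_alt s = ∑ e ∈ Finset.range s.toList.length,
      PySem.Int.floordiv
        ((gscan [] ((s.toList.take (e + 1)).reverse) : Int)
          * ((gscan [] ((s.toList.take (e + 1)).reverse) : Int) + 1)) 2 := by
  set cs := s.toList with hcs
  set n := cs.length with hn
  simp only [func_alt, PySem.Str.len_eq, ← hcs, ← hn]
  rw [PySem.List.foldl_add]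
  simp only [PySem.List.pyRange_one, List.map_map, sub_zero,
    Int.toNat_natCast, sum_map_range, zero_add]
  refine Finset.sum_congr rfl ?_
  intro e he
  simp only [Finset.mem_range] at he
  simp only [Function.comp]
  rw [show PySem.Set.empty = ([] : List Char) from rfl]
  rw [bscan_eq cs e (by omega) [] 0]
  ring_nf

-- ===== VERDICT (by name: the statement is the Claim_ definition above) =====
theorem func_spec : Claim_equal_func := by
  intro s _
  unfold Spec_func
  rw [funcA_eq, funcB_eq]
  rw [sum_exchange s.toList.length (fun i j => Fsub s.toList (i + 1) j)]
  exact Finset.sum_congr rfl (fun e he => per_e s.toList e (by simpa using he))
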